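-- pv_equiv track=rewrite | github.com/Matt-RH/checkio | checkio/elementary/three_words.py | checkio
-- ===== SOURCE A (Python) =====
-- def checkio(words: str) -> bool:
--     """
--     Let's teach the Robots to distinguish words and numbers.
--     You are given a string with words and numbers separated by whitespaces
--     (one space). The words contains only letters. You should check if the
--     string contains three words in succession. For example, the string
--     "start 5 one two three 7 end" contains three words in succession.
--
--     Input: A string with words.
--     Output: The answer as a boolean.
--     Precondition: The input contains words and/or numbers. There are no mixed
--     words (letters and digits combined).
--     """
--
--     count = 0
--     for w in words.split():
--         try:
--             int(w)
--             count = 0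
--         except ValueError:
--             count += 1
--         if count >= 3:
--             return True
--         else:
--             pass
--     return False
-- ===== SOURCE B (Python) =====
-- def checkio(words: str) -> bool:
--     def marker(w):
--         try:
--             int(w)
--             return 'n'
--         except ValueError:
--             return 'w'
--     markers = ''.join(marker(w) for w in words.split())
--     return 'www' in markers
-- ===== Notes on version B (the rewrite author's own statement) =====
-- stated objective: idiomatic
-- what changed: Replaces the running counter with early exit by mapping every token to a one-character marker ('n' for ints, 'w' for words) and testing whether three consecutive word markers occur as a substring of the joined marker string.
import Mathlib
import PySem

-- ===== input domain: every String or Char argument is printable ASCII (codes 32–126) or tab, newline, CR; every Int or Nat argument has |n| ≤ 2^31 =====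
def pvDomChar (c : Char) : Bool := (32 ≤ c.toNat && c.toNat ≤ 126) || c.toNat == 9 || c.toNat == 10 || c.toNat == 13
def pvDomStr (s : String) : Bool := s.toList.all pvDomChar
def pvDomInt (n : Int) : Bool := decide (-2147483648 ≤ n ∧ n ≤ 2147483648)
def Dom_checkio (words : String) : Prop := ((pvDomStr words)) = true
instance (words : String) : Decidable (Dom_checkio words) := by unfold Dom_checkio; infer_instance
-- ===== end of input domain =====

-- B replaces A's running counter with a marker string ('n'/'w' per token) searched for three consecutive word markers: idiomatic, same cost.

-- ===== PORT A =====
-- the for-loop over words.split() with its count accumulator and early return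
def checkioLoop : List String → Int → Bool
  | [], _ => false
  | w :: ws, count =>
    let count' := match PySem.Int.ofStr? w with
      | some _ => 0          -- int(w) succeeded: count = 0
      | none => count + 1    -- ValueError: count += 1
    if count' ≥ 3 then true else checkioLoop ws count'

def checkio (words : String) : Bool :=
  checkioLoop (PySem.Str.split₀ words) 0

-- ===== PORT B =====
-- marker(w): 'n' if int(w) succeeds, 'w' on ValueError
def pvMarker (w : String) : Char :=
  if (PySem.Int.ofStr? w).isSome then 'n' else 'w'

def checkio_alt (words : String) : Bool :=
  PySem.Chars.isIn ['w', 'w', 'w'] ((PySem.Str.split₀ words).map pvMarker)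

-- ===== PRECONDITION & SPEC =====
def Spec_checkio (words : String) (out : Bool) : Prop := out = checkio_alt words
instance (words : String) (out : Bool) : Decidable (Spec_checkio words out) := by unfold Spec_checkio; infer_instance

-- ===== CLAIM (what is proved, stated in full; the proofs are below) =====
def Claim_equal_checkio : Prop := ∀ (words : String), Dom_checkio words → Spec_checkio words (checkio words)

-- ===== LEMMAS AND PROOFS =====

theorem www_infix_cons_n (rest : List Char) (c : Nat) (hc : c < 3) :
    (['w', 'w', 'w'] <:+: (List.replicate c 'w' ++ 'n' :: rest)) ↔ ['w', 'w', 'w'] <:+: rest := by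
  interval_cases c <;>
    simp [List.infix_cons_iff, List.cons_prefix_cons]

theorem checkioLoop_eq (l : List String) (c : Nat) (hc : c < 3) :
    checkioLoop l (c : Int) =
      PySem.Chars.isIn ['w', 'w', 'w'] (List.replicate c 'w' ++ l.map pvMarker) := by
  induction l generalizing c with
  | nil =>
    simp only [List.map_nil, List.append_nil, checkioLoop]
    rw [eq_comm, PySem.Chars.isIn_eq_false_iff]
    intro h
    have := h.length_le
    simp at this
    omega
  | cons w ws ih =>
    rcases hsome : PySem.Int.ofStr? w with _ | n
    · -- ValueError: marker 'w', count += 1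
      have hm : pvMarker w = 'w' := by simp [pvMarker, hsome]
      by_cases h3 : c = 2
      · subst h3
        simp only [checkioLoop, hsome, List.map_cons, hm]
        rw [if_pos (by norm_num), eq_comm, PySem.Chars.isIn_iff_infix]
        exact ⟨[], ws.map pvMarker, rfl⟩
      · have h1 : (c : Int) + 1 = ((c + 1 : Nat) : Int) := by push_cast; ring
        simp only [checkioLoop, hsome, List.map_cons, hm]
        rw [if_neg (by intro h; have : (3:ℤ) ≤ (c:ℤ)+1 := h; omega), h1, ih (c + 1) (by omega)]
        congr 1
        simp [List.replicate_succ' (n := c)]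
    · -- int succeeded: marker 'n', count = 0
      have hm : pvMarker w = 'n' := by simp [pvMarker, hsome]
      simp only [checkioLoop, hsome, List.map_cons, hm]
      rw [if_neg (by norm_num)]
      have := ih 0 (by omega)
      simp only [List.replicate_zero, List.nil_append, Int.natCast_zero] at this
      rw [this]
      rcases hb : PySem.Chars.isIn ['w','w','w'] (ws.map pvMarker) with _ | _
      · rw [PySem.Chars.isIn_eq_false_iff] at hb
        rw [eq_comm, PySem.Chars.isIn_eq_false_iff]
        intro h
        exact hb ((www_infix_cons_n (ws.map pvMarker) c hc).mp h)
      · rw [PySem.Chars.isIn_iff_infix] at hb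
        rw [eq_comm, PySem.Chars.isIn_iff_infix]
        exact (www_infix_cons_n (ws.map pvMarker) c hc).mpr hb

-- ===== VERDICT (by name: the statement is the Claim_ definition above) =====
theorem checkio_spec : Claim_equal_checkio := by
  intro words _
  unfold Spec_checkio checkio checkio_alt
  have := checkioLoop_eq (PySem.Str.split₀ words) 0 (by omega)
  simpa using this
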